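-- pv_equiv track=rewrite | github.com/OneL1ght/math_methods | lab1/main.py | find_contr_reachable_recursively
-- ===== SOURCE A (Python) =====
-- def find_contr_reachable_recursively(relations: dict, goal_node, result=None):
--     if result is None:
--         result = set()
--     result.add(goal_node)
--     parents = [p for p in relations.keys() if goal_node in relations[p]]
--     for parent in parents:
--         if parent not in result:
--             find_contr_reachable_recursively(relations, parent, result)
--     return result
-- ===== SOURCE B (Python) =====
-- def find_contr_reachable_recursively(relations: dict, goal_node, result=None):
--     if result is None:
--         result = set()
--     # reverse-adjacency index built once: rev[c] = parents p (in key order) with c in relations[p]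
--     rev = {}
--     for p, children in relations.items():
--         for c in children:
--             lst = rev.setdefault(c, [])
--             if not lst or lst[-1] != p:
--                 lst.append(p)
--     def dfs(node):
--         result.add(node)
--         for parent in rev.get(node, []):
--             if parent not in result:
--                 dfs(parent)
--     dfs(goal_node)
--     return result
-- ===== Notes on version B (the rewrite author's own statement) =====
-- stated objective: alternative
-- what changed: B builds a reverse-adjacency index once in a single pass over the relations, so the DFS looks each node's parents up directly (a single self-recursive fold over that list) instead of A's per-visited-node scan of every key's child list; it trades an O(E) upfront indexing pass for removing A's O(V*E) per-node scans.
import Mathlib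
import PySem

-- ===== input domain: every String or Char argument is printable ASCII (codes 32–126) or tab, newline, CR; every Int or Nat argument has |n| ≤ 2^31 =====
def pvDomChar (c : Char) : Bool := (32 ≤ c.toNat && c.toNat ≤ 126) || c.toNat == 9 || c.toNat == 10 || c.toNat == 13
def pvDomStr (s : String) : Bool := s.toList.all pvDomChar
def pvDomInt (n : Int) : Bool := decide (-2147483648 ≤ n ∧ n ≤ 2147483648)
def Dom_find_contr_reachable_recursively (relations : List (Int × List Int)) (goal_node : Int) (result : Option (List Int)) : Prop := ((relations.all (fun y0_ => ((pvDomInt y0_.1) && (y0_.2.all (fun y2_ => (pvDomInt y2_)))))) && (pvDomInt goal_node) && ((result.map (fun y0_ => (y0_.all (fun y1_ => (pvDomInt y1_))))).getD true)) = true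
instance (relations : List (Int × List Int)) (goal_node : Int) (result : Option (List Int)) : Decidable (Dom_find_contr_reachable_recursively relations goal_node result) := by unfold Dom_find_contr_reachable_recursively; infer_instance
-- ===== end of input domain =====

-- B replaces A's per-node scan of all keys by a reverse-adjacency index built once in a single pass,
-- and its DFS is one self-recursive fold over the indexed parents (no separate key-scan loop);
-- A mutates the passed-in `result` set in place (B does the same); the equivalence proved here is about the return value.

-- ===== PORT A =====
-- fuel is a pure totality guard: the DFS nests at most (#distinct keys)+1 deep, so fuel = relations.length+1 is never exhausted
mutual
def pvGoA (d : PySem.Dict Int (List Int)) (node : Int) (res : PySem.Set Int) (fuel : Nat) : PySem.Set Int :=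
  let res' := PySem.Set.add res node
  match fuel with
  | 0 => res'
  | f + 1 => pvLoopA d (d.keys.filter (fun p => (d.getD p []).contains node)) res' f
termination_by (fuel, 0)
decreasing_by all_goals (simp_wf; first | (apply Prod.Lex.left; omega) | (apply Prod.Lex.right; omega))
def pvLoopA (d : PySem.Dict Int (List Int)) (ps : List Int) (res : PySem.Set Int) (f : Nat) : PySem.Set Int :=
  match ps with
  | [] => res
  | p :: rest =>
      if PySem.Set.contains res p then pvLoopA d rest res f
      else pvLoopA d rest (pvGoA d p res f) f
termination_by (f, ps.length + 1)
decreasing_by all_goals (simp_wf; first | (apply Prod.Lex.left; omega) | (apply Prod.Lex.right; omega))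
end

def find_contr_reachable_recursively (relations : List (Int × List Int)) (goal_node : Int) (result : Option (List Int)) : List Int :=
  let d := PySem.Dict.ofList relations
  let res0 : PySem.Set Int := match result with
    | none => PySem.Set.empty
    | some l => PySem.Set.ofList l
  pvGoA d goal_node res0 (relations.length + 1)

-- ===== PORT B =====
-- lst = rev.setdefault(c, []); if not lst or lst[-1] != p: lst.append(p)
def pvAddParent (rev : PySem.Dict Int (List Int)) (p c : Int) : PySem.Dict Int (List Int) :=
  let lst := rev.getD c []
  if lst.getLast? = some p then rev else rev.insert c (lst ++ [p])

def pvRev (relations : List (Int × List Int)) : PySem.Dict Int (List Int) :=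
  (PySem.Dict.ofList relations).items.foldl
    (fun rev pr => pr.2.foldl (fun rev c => pvAddParent rev pr.1 c) rev) PySem.Dict.empty

-- def dfs(node): result.add(node); for parent in rev.get(node, []): if parent not in result: dfs(parent)
-- the for-loop is the foldl; fuel is a pure totality guard (never exhausted, same bound as A's)
def pvDfsB (rev : PySem.Dict Int (List Int)) (node : Int) (res : PySem.Set Int) (fuel : Nat) : PySem.Set Int :=
  match fuel with
  | 0 => PySem.Set.add res node
  | f + 1 =>
      (rev.getD node []).foldl
        (fun r parent => if PySem.Set.contains r parent then r else pvDfsB rev parent r f)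
        (PySem.Set.add res node)

def find_contr_reachable_recursively_alt (relations : List (Int × List Int)) (goal_node : Int) (result : Option (List Int)) : List Int :=
  pvDfsB (pvRev relations)
    goal_node
    (PySem.Set.ofList (result.getD []))
    (relations.length + 1)

-- ===== PRECONDITION & SPEC =====
def Spec_find_contr_reachable_recursively (relations : List (Int × List Int)) (goal_node : Int) (result : Option (List Int)) (out : List Int) : Prop := out = find_contr_reachable_recursively_alt relations goal_node result
instance (relations : List (Int × List Int)) (goal_node : Int) (result : Option (List Int)) (out : List Int) : Decidable (Spec_find_contr_reachable_recursively relations goal_node result out) := by unfold Spec_find_contr_reachable_recursively; infer_instance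

-- ===== CLAIM (what is proved, stated in full; the proofs are below) =====
def Claim_equal_find_contr_reachable_recursively : Prop := ∀ (relations : List (Int × List Int)) (goal_node : Int) (result : Option (List Int)), Dom_find_contr_reachable_recursively relations goal_node result → Spec_find_contr_reachable_recursively relations goal_node result (find_contr_reachable_recursively relations goal_node result)

-- ===== LEMMAS AND PROOFS =====

-- the inner children loop of pvRev appends p to rev[c] exactly once when c occurs in children
lemma pvAddParent_fold (p : Int) (children : List Int) :
    ∀ (rev : PySem.Dict Int (List Int)) (c : Int),
      (children.foldl (fun rev c => pvAddParent rev p c) rev).getD c []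
        = rev.getD c [] ++
          (if c ∈ children ∧ (rev.getD c []).getLast? ≠ some p then [p] else []) := by
  induction children with
  | nil => intro rev c; simp
  | cons c0 cs ih =>
    intro rev c
    simp only [List.foldl_cons]
    by_cases hl : (rev.getD c0 []).getLast? = some p
    · have hstep : pvAddParent rev p c0 = rev := by simp [pvAddParent, hl]
      rw [hstep, ih]
      by_cases hc : c = c0
      · subst hc; simp [hl]
      · simp [List.mem_cons, hc]
    · have hstep : pvAddParent rev p c0 = rev.insert c0 (rev.getD c0 [] ++ [p]) := by
        simp [pvAddParent, hl]
      rw [hstep, ih]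
      by_cases hc : c = c0
      · subst hc
        simp [hl]
      · simp [PySem.Dict.getD_insert, hc, List.mem_cons]

-- the outer items loop of pvRev: rev[c] = parents of c in items order
lemma pvRev_fold (l : List (Int × List Int)) :
    ∀ (rev : PySem.Dict Int (List Int)) (c : Int),
      (l.map (·.1)).Nodup →
      (∀ c' q, ((rev.getD c' []).getLast? = some q) → q ∉ l.map (·.1)) →
      (l.foldl (fun rev pr => pr.2.foldl (fun rev c => pvAddParent rev pr.1 c) rev) rev).getD c []
        = rev.getD c [] ++ (l.filter (fun pr => pr.2.contains c)).map (·.1) := by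
  induction l with
  | nil => intro rev c _ _; simp
  | cons pr rest ih =>
    intro rev c hnd hlast
    simp only [List.map_cons, List.nodup_cons] at hnd
    simp only [List.foldl_cons]
    have h1 : ∀ c' : Int,
        (pr.2.foldl (fun rev c => pvAddParent rev pr.1 c) rev).getD c' []
          = rev.getD c' [] ++ (if c' ∈ pr.2 then [pr.1] else []) := by
      intro c'
      rw [pvAddParent_fold]
      have : (rev.getD c' []).getLast? ≠ some pr.1 := by
        intro h
        exact (hlast c' pr.1 h) (by simp)
      by_cases hm : c' ∈ pr.2 <;> simp [hm, this]
    rw [ih _ c hnd.2]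
    · rw [h1, List.filter_cons]
      by_cases hm : c ∈ pr.2
      · simp [hm, List.append_assoc]
      · simp [hm]
    · intro c' q hq
      rw [h1] at hq
      by_cases hm : c' ∈ pr.2
      · simp [hm] at hq
        subst hq; exact hnd.1
      · simp [hm] at hq
        intro hmem
        exact (hlast c' q hq) (by simp [hmem])

-- A's per-node parents scan over keys equals the corresponding items scan
lemma keys_filter_eq_items (d : PySem.Dict Int (List Int)) (c : Int) (h : d.keys.Nodup) :
    d.keys.filter (fun p => (d.getD p []).contains c)
      = (d.items.filter (fun pr => pr.2.contains c)).map (·.1) := by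
  have hk : d.keys = d.items.map (·.1) := rfl
  rw [hk, List.filter_map]
  refine congrArg (List.map _) (List.filter_congr ?_)
  intro pr hpr
  simp only [Function.comp]
  rw [PySem.Dict.getD_of_mem_items d (show (pr.1, pr.2) ∈ d.items by simpa using hpr) h []]

-- rev[c] = A's parents list of c
lemma pvRev_getD (relations : List (Int × List Int)) (c : Int) :
    (pvRev relations).getD c []
      = (PySem.Dict.ofList relations).keys.filter
          (fun p => ((PySem.Dict.ofList relations).getD p []).contains c) := by
  have hnd : ((PySem.Dict.ofList relations).items.map (·.1)).Nodup :=
    PySem.Dict.nodup_keys_ofList relations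
  rw [pvRev]
  rw [pvRev_fold _ _ c hnd (by intro c' q hq; simp [PySem.Dict.getD_empty] at hq)]
  rw [keys_filter_eq_items _ c (PySem.Dict.nodup_keys_ofList relations)]
  simp [PySem.Dict.getD_empty]

-- A's explicit parents loop is the fold B's DFS performs
lemma loopA_eq_foldl (d : PySem.Dict Int (List Int)) (f : Nat) :
    ∀ (ps : List Int) (res : PySem.Set Int),
      pvLoopA d ps res f
        = ps.foldl (fun r p => if PySem.Set.contains r p then r else pvGoA d p r f) res := by
  intro ps
  induction ps with
  | nil => intro res; simp [pvLoopA]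
  | cons p rest ih =>
    intro res
    rw [pvLoopA, List.foldl_cons]
    split
    · exact ih res
    · exact ih _

-- the two DFS recursions coincide once the parents lists coincide
lemma goA_eq_dfsB (d rev : PySem.Dict Int (List Int))
    (hpar : ∀ c, rev.getD c [] = d.keys.filter (fun p => (d.getD p []).contains c)) :
    ∀ (fuel : Nat) (node : Int) (res : PySem.Set Int),
      pvGoA d node res fuel = pvDfsB rev node res fuel := by
  intro fuel
  induction fuel with
  | zero => intro node res; simp [pvGoA, pvDfsB]
  | succ f ih =>
    intro node res
    rw [pvGoA, pvDfsB, hpar, loopA_eq_foldl]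
    have hf : (fun r p => if PySem.Set.contains r p then r else pvGoA d p r f)
        = (fun r p => if PySem.Set.contains r p then r else pvDfsB rev p r f) := by
      funext r p; rw [ih]
    rw [hf]

-- ===== VERDICT (by name: the statement is the Claim_ definition above) =====
theorem find_contr_reachable_recursively_spec : Claim_equal_find_contr_reachable_recursively := by
  intro relations goal_node result _
  unfold Spec_find_contr_reachable_recursively
  unfold find_contr_reachable_recursively find_contr_reachable_recursively_alt
  cases result <;>
    exact goA_eq_dfsB _ _ (fun c => pvRev_getD relations c) _ _ _
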